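-- pv_equiv track=rewrite | github.com/alexp25/watergame-other | classification/eval_results_accuracy_deep.py | sort_by_exp
-- ===== SOURCE A (Python) =====
-- def sort_by_exp(files):
--     exp_files = {}
--     for f in files:
--         f1 = f.split("_")
--         exp_id = f1[1]
--         if exp_id in exp_files:
--             exp_files[exp_id].append(f)
--         else:
--             exp_files[exp_id] = [f]
--     return exp_files
-- ===== SOURCE B (Python) =====
-- def sort_by_exp(files):
--     # two-pass: dedup the experiment ids in first-occurrence order, then one
--     # filter pass per id; same dict (insertion order, grouped file order) as A
--     keys = list(dict.fromkeys(f.split("_")[1] for f in files))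
--     return {k: [f for f in files if f.split("_")[1] == k] for k in keys}
-- ===== Notes on version B (the rewrite author's own statement) =====
-- stated objective: alternative
-- what changed: replaces the single-pass dict-accumulation (append-or-create per file) with a two-pass scheme: dedup the extracted experiment ids in first-occurrence order, then build each group by an independent filter pass over the whole list
import Mathlib
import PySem

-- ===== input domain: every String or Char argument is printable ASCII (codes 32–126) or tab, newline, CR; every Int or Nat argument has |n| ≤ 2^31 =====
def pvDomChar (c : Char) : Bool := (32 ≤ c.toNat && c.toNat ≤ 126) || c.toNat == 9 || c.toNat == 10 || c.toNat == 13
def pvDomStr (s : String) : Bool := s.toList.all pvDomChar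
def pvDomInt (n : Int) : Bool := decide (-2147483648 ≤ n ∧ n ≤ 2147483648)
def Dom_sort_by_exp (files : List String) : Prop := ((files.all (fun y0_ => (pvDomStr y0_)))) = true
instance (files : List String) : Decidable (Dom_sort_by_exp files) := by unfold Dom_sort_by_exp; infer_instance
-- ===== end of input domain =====

-- B replaces A's single-pass dict accumulation by dedup-of-ids + one filter pass per id (alternative decomposition, same result).


-- ===== PORT A =====
-- shared key extraction: f.split("_")[1]  (IndexError = none is excluded by Pre_, so getD "" is never the value used)
def pvKey (f : String) : String :=
  (PySem.List.pyGet? ((PySem.Str.split? f "_").getD []) 1).getD ""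

def sort_by_exp (files : List String) : List (String × List String) :=
  (files.foldl (fun exp_files f =>
      let exp_id := pvKey f
      if exp_files.contains exp_id then
        exp_files.insert exp_id (exp_files.getD exp_id [] ++ [f])   -- exp_files[exp_id].append(f)
      else
        exp_files.insert exp_id [f])
    (PySem.Dict.mk [])).items

-- ===== PORT B =====
def sort_by_exp_alt (files : List String) : List (String × List String) :=
  let keys := PySem.Set.ofList (files.map pvKey)   -- dict.fromkeys dedup, first-occurrence order
  keys.map (fun k => (k, files.filter (fun f => pvKey f == k)))

-- ===== PRECONDITION & SPEC =====
-- Pre_ excludes exactly the filenames with no "_", on which A raises IndexError (f.split("_")[1]); B raises there too.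
def Pre_sort_by_exp (files : List String) : Prop := ∀ f ∈ files, PySem.Str.isIn "_" f = true
instance (files : List String) : Decidable (Pre_sort_by_exp files) := by unfold Pre_sort_by_exp; infer_instance
def pvWitness_sort_by_exp : List String := ["run_7_a", "run_3_b", "x_7"]
def Spec_sort_by_exp (files : List String) (out : List (String × List String)) : Prop := out = sort_by_exp_alt files
instance (files : List String) (out : List (String × List String)) : Decidable (Spec_sort_by_exp files out) := by unfold Spec_sort_by_exp; infer_instance

-- ===== CLAIM (what is proved, stated in full; the proofs are below) =====
def Claim_equal_sort_by_exp : Prop := ∀ (files : List String), Dom_sort_by_exp files → Pre_sort_by_exp files → Spec_sort_by_exp files (sort_by_exp files)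

-- ===== LEMMAS AND PROOFS =====

-- the grouping invariant: A's dict loop over l has exactly B's items
theorem pv_fold_items (l : List String) :
    (l.foldl (fun d f =>
        let exp_id := pvKey f
        if d.contains exp_id then d.insert exp_id (d.getD exp_id [] ++ [f])
        else d.insert exp_id [f]) (PySem.Dict.mk [])).items
      = (PySem.Set.ofList (l.map pvKey)).map
          (fun k => (k, l.filter (fun f => pvKey f == k))) := by
  induction l using List.reverseRecOn with
  | nil => rfl
  | append_singleton l f ih =>
    rw [List.foldl_append]
    set d := l.foldl (fun d f =>
        let exp_id := pvKey f
        if d.contains exp_id then d.insert exp_id (d.getD exp_id [] ++ [f])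
        else d.insert exp_id [f]) (PySem.Dict.mk []) with hd
    have hkeys : d.keys = PySem.Set.ofList (l.map pvKey) := by
      show d.items.map Prod.fst = _
      rw [ih, List.map_map]
      exact List.map_id _
    have hnodup : d.keys.Nodup := by rw [hkeys]; exact PySem.Set.nodup_ofList _
    have hcont : d.contains (pvKey f) = decide (pvKey f ∈ l.map pvKey) := by
      rw [PySem.Dict.contains_eq_decide_mem_keys, hkeys]
      by_cases h : pvKey f ∈ l.map pvKey <;>
        simp [h, PySem.Set.mem_ofList]
    simp only [List.foldl_cons, List.foldl_nil, List.map_append, List.map_cons, List.map_nil,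
      PySem.Set.ofList_append_singleton]
    by_cases hmem : pvKey f ∈ l.map pvKey
    · -- key already present: in-place overwrite
      have hc : d.contains (pvKey f) = true := by rw [hcont]; simp [hmem]
      have hgd : d.getD (pvKey f) [] = l.filter (fun g => pvKey g == pvKey f) := by
        refine PySem.Dict.getD_of_mem_items d ?_ hnodup []
        rw [ih]
        exact List.mem_map_of_mem (by rw [PySem.Set.mem_ofList]; exact hmem)
      simp only [hc, if_true]
      rw [PySem.Dict.items_insert_of_contains d _ hc, ih, List.map_map,
          PySem.Set.add_of_mem (by rw [PySem.Set.mem_ofList]; exact hmem)]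
      refine List.map_congr_left (fun k' _ => ?_)
      by_cases hk : k' = pvKey f
      · subst hk
        simp [hgd, List.filter_append]
      · have : (k' == pvKey f) = false := by simp [hk]
        simp [Function.comp, this, List.filter_append, Ne.symm hk]
    · -- fresh key: appended at the end
      have hc : d.contains (pvKey f) = false := by rw [hcont]; simp [hmem]
      simp only [hc, if_false, Bool.false_eq_true]
      rw [PySem.Dict.items_insert_of_not_contains d _ hc, ih,
          PySem.Set.add_of_not_mem (by rw [PySem.Set.mem_ofList]; exact hmem),
          List.map_append]
      congr 1
      · refine List.map_congr_left (fun k' hk' => ?_)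
        have hk'mem : k' ∈ l.map pvKey := (PySem.Set.mem_ofList _ _).mp hk'
        have hne : pvKey f ≠ k' := fun h => hmem (h ▸ hk'mem)
        simp [List.filter_append, hne]
      · have hnil : l.filter (fun g => pvKey g == pvKey f) = [] := by
          apply List.filter_eq_nil_iff.mpr
          intro g hg h
          simp only [beq_iff_eq] at h
          exact hmem (h ▸ List.mem_map_of_mem hg)
        simp [List.filter_append, hnil]

-- ===== VERDICT (by name: the statement is the Claim_ definition above) =====
theorem sort_by_exp_spec : Claim_equal_sort_by_exp := by
  intro files _ _
  show sort_by_exp files = sort_by_exp_alt files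
  unfold sort_by_exp sort_by_exp_alt
  exact pv_fold_items files
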